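-- pv_equiv track=rewrite | github.com/tpardo12/DalggT2 | proyecto/Final/ayuda1.py | dp_indiana_marion
-- ===== SOURCE A (Python) =====
-- def dp_indiana_marion(R, C, matriz, central_row):
--     """
--     Calcula el máximo de reliquias que Indiana y Marion pueden recolectar juntos,
--     permitiendo que ambos pasen por la misma casilla y sigan recolectando reliquias
--     aunque uno de los dos no pueda moverse en algún paso.
--
--     :param R: Número de filas de la matriz.
--     :param C: Número de columnas de la matriz.
--     :param matriz: Matriz de reliquias y maldiciones.
--     :param central_row: Índice de la fila central.
--     :return: La cantidad máxima de reliquias recolectadas por Indiana y Marion.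
--     """
--     steps = central_row
--     # Inicializar DP
--     dp_prev = [[-1 for _ in range(C)] for _ in range(C)]
--
--     # Condición inicial: ambos empiezan en las esquinas
--     if matriz[0][0] != -1 and matriz[0][C-1] != -1:
--         dp_prev[0][C-1] = matriz[0][0] + matriz[0][C-1]
--     else:
--         return -1  # Al menos uno de los personajes no puede comenzar
--
--     # Recorrer cada fila hasta la fila central
--     for s in range(1, steps + 1):
--         dp_next = [[-1 for _ in range(C)] for _ in range(C)]
--         row = s
--
--         # Para cada combinación de posiciones previas
--         for ci_prev in range(C):
--             for cm_prev in range(C):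
--                 if dp_prev[ci_prev][cm_prev] == -1:
--                     continue
--
--                 # Movimientos posibles de Indiana
--                 for di in [-1, 0, 1]:
--                     ci_new = ci_prev + di
--                     if not (0 <= ci_new < C) or matriz[row][ci_new] == -1:
--                         continue
--
--                     # Movimientos posibles de Marion
--                     for dm in [-1, 0, 1]:
--                         cm_new = cm_prev + dm
--                         if not (0 <= cm_new < C) or matriz[row][cm_new] == -1:
--                             continue
--
--                         # Recolectar reliquias si ambos están en la misma celda
--                         if ci_new == cm_new:
--                             total = dp_prev[ci_prev][cm_prev] + matriz[row][ci_new]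
--                         else:
--                             total = dp_prev[ci_prev][cm_prev] + matriz[row][ci_new] + matriz[row][cm_new]
--
--                         # Actualizar el DP con el valor máximo
--                         if total > dp_next[ci_new][cm_new]:
--                             dp_next[ci_new][cm_new] = total
--
--         # Actualizamos la fila previa a la siguiente
--         dp_prev = dp_next
--
--     # Obtener el máximo de reliquias recolectadas por Indiana y Marion
--     max_relics = -1
--     for ci in range(C):
--         for cm in range(C):
--             if dp_prev[ci][cm] > max_relics:
--                 max_relics = dp_prev[ci][cm]
--
--     return max_relics
-- ===== SOURCE B (Python) =====
-- def _celda(C, fila, dp, ci, cm):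
--     # Value of the new DP layer at (ci, cm): -1 if a traveler's target cell is
--     # cursed, else best reachable predecessor plus this row's reward, floored
--     # at -1 (-1 encodes "unreachable" throughout).
--     if fila[ci] == -1 or fila[cm] == -1:
--         return -1
--     premio = fila[ci] if ci == cm else fila[ci] + fila[cm]
--     return max([-1] + [dp[pi][pm] + premio
--                        for pi in (ci - 1, ci, ci + 1) if 0 <= pi < C
--                        for pm in (cm - 1, cm, cm + 1) if 0 <= pm < C
--                        if dp[pi][pm] != -1])
--
--
-- def dp_indiana_marion(R, C, matriz, central_row):
--     # Pull/gather formulation: each new layer is built cell by cell as a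
--     # comprehension, taking the max over the 9 predecessor offsets, instead of
--     # pushing updates from every predecessor into a mutable grid.
--     if matriz[0][0] == -1 or matriz[0][C - 1] == -1:
--         return -1
--     inicio = matriz[0][0] + matriz[0][C - 1]
--     dp = [[inicio if ci == 0 and cm == C - 1 else -1 for cm in range(C)]
--           for ci in range(C)]
--     for row in range(1, central_row + 1):
--         fila = matriz[row]
--         dp = [[_celda(C, fila, dp, ci, cm) for cm in range(C)] for ci in range(C)]
--     return max(-1, max(v for f in dp for v in f))
-- ===== Notes on version B (the rewrite author's own statement) =====
-- stated objective: alternative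
-- what changed: The push-style transition (four nested loops spraying conditional max-updates into a mutable dp_next grid) is replaced by a pull/gather DP: each new layer is built cell-by-cell as a comprehension taking the max over the 9 predecessor offsets, and the final scan becomes a single max over the flattened layer.
-- outside the precondition, e.g. on dp_indiana_marion(3, 2, [[1, 1], [-1, -1], [0]], 2): A returns -1, B raises IndexError
import Mathlib
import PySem

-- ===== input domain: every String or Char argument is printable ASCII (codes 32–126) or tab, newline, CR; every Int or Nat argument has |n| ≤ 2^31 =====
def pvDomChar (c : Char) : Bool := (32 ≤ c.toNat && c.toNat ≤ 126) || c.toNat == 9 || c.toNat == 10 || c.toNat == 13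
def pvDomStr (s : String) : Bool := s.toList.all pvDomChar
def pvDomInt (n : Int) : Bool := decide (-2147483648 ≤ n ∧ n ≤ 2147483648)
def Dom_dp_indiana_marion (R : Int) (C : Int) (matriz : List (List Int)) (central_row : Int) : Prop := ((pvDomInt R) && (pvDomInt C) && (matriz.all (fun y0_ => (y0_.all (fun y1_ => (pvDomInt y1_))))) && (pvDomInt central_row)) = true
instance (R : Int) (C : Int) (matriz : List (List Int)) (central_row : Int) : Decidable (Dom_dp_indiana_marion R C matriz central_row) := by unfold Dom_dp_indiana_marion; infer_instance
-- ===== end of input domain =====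

-- B replaces A's push-style DP transition (four nested loops spraying conditional
-- max-updates into a mutable dp_next grid) by a pull/gather DP building each new
-- layer cell-by-cell as a comprehension over the 9 predecessor offsets; same cost.

-- ===== PORT A =====
-- Helpers name A's loop bodies; each is a line-by-line transliteration of A's Python.
def pvGridA (C : Int) : List (List Int) :=
  (PySem.List.pyRange 0 C).map (fun _ => (PySem.List.pyRange 0 C).map (fun _ => (-1 : Int)))

-- Python's "if total > dp_next[ci_new][cm_new]: dp_next[ci_new][cm_new] = total"
def pvUpdA (dp_next : List (List Int)) (ci cm total : Int) : List (List Int) :=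
  if total > PySem.List.pyGetD (PySem.List.pyGetD dp_next ci []) cm (-1) then
    PySem.List.pySetD dp_next ci
      (PySem.List.pySetD (PySem.List.pyGetD dp_next ci []) cm total)
  else dp_next

-- the body of A's "for s in range(1, steps+1)" (fila = matriz[s])
def pvStepA (C : Int) (fila : List Int) (dp_prev : List (List Int)) : List (List Int) :=
  (PySem.List.pyRange 0 C).foldl (fun dp_next ci_prev =>
    (PySem.List.pyRange 0 C).foldl (fun dp_next cm_prev =>
      let v := PySem.List.pyGetD (PySem.List.pyGetD dp_prev ci_prev []) cm_prev (-1)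
      if v = -1 then dp_next
      else
        ([-1, 0, 1] : List Int).foldl (fun dp_next di =>
          let ci_new := ci_prev + di
          if ¬(0 ≤ ci_new ∧ ci_new < C) ∨ PySem.List.pyGetD fila ci_new 0 = -1 then dp_next
          else
            ([-1, 0, 1] : List Int).foldl (fun dp_next dm =>
              let cm_new := cm_prev + dm
              if ¬(0 ≤ cm_new ∧ cm_new < C) ∨ PySem.List.pyGetD fila cm_new 0 = -1 then dp_next
              else
                let total :=
                  if ci_new = cm_new then v + PySem.List.pyGetD fila ci_new 0
                  else v + PySem.List.pyGetD fila ci_new 0 + PySem.List.pyGetD fila cm_new 0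
                pvUpdA dp_next ci_new cm_new total) dp_next) dp_next) dp_next) (pvGridA C)

-- Python's final "max_relics" double scan (v = dp_prev[ci][cm] read where it is used)
def pvFinalA (C : Int) (dp_prev : List (List Int)) : Int :=
  (PySem.List.pyRange 0 C).foldl (fun mx ci =>
    (PySem.List.pyRange 0 C).foldl (fun mx cm =>
      if PySem.List.pyGetD (PySem.List.pyGetD dp_prev ci []) cm (-1) > mx then
        PySem.List.pyGetD (PySem.List.pyGetD dp_prev ci []) cm (-1)
      else mx) mx) (-1)

def dp_indiana_marion (R : Int) (C : Int) (matriz : List (List Int)) (central_row : Int) : Int :=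
  if PySem.List.pyGetD (PySem.List.pyGetD matriz 0 []) 0 0 ≠ -1 ∧
      PySem.List.pyGetD (PySem.List.pyGetD matriz 0 []) (C - 1) 0 ≠ -1 then
    pvFinalA C
      ((PySem.List.pyRange 1 (central_row + 1)).foldl
        (fun dp_prev s => pvStepA C (PySem.List.pyGetD matriz s []) dp_prev)
        (PySem.List.pySetD (pvGridA C) 0
          (PySem.List.pySetD (PySem.List.pyGetD (pvGridA C) 0 []) (C - 1)
            (PySem.List.pyGetD (PySem.List.pyGetD matriz 0 []) 0 0 +
              PySem.List.pyGetD (PySem.List.pyGetD matriz 0 []) (C - 1) 0))))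
  else -1

-- ===== PORT B =====
-- transliteration of Source B's _celda
def pvCelda (C : Int) (fila : List Int) (dp : List (List Int)) (ci cm : Int) : Int :=
  if PySem.List.pyGetD fila ci 0 = -1 ∨ PySem.List.pyGetD fila cm 0 = -1 then -1
  else
    let premio := if ci = cm then PySem.List.pyGetD fila ci 0
                  else PySem.List.pyGetD fila ci 0 + PySem.List.pyGetD fila cm 0
    -- Python's max([-1] + cands) is the left max-fold of cands started at -1
    ((([ci - 1, ci, ci + 1] : List Int).filter (fun pi => decide (0 ≤ pi ∧ pi < C))).flatMap
      (fun pi =>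
        (([cm - 1, cm, cm + 1] : List Int).filter (fun pm => decide (0 ≤ pm ∧ pm < C))).filterMap
          (fun pm =>
            if PySem.List.pyGetD (PySem.List.pyGetD dp pi []) pm (-1) ≠ -1 then
              some (PySem.List.pyGetD (PySem.List.pyGetD dp pi []) pm (-1) + premio)
            else none))).foldl max (-1)

-- one layer of Source B's pull DP
def pvStepB (C : Int) (fila : List Int) (dp : List (List Int)) : List (List Int) :=
  (PySem.List.pyRange 0 C).map (fun ci =>
    (PySem.List.pyRange 0 C).map (fun cm => pvCelda C fila dp ci cm))

def dp_indiana_marion_alt (R : Int) (C : Int) (matriz : List (List Int)) (central_row : Int) : Int :=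
  if PySem.List.pyGetD (PySem.List.pyGetD matriz 0 []) 0 0 = -1 ∨
     PySem.List.pyGetD (PySem.List.pyGetD matriz 0 []) (C - 1) 0 = -1 then -1
  else
    -- Python's max(-1, max(flattened dp)) is the left max-fold of the flattened grid from -1
    ((PySem.List.pyRange 1 (central_row + 1)).foldl
      (fun dp row => pvStepB C (PySem.List.pyGetD matriz row []) dp)
      ((PySem.List.pyRange 0 C).map (fun ci =>
        (PySem.List.pyRange 0 C).map (fun cm =>
          if ci = 0 ∧ cm = C - 1 then
            PySem.List.pyGetD (PySem.List.pyGetD matriz 0 []) 0 0 +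
              PySem.List.pyGetD (PySem.List.pyGetD matriz 0 []) (C - 1) 0
          else -1)))).flatten.foldl max (-1)

-- ===== PRECONDITION & SPEC =====
-- Pre_ excludes inputs where A raises (an index error on the start corners, C ≤ 0,
-- central_row ≥ len(matriz), or a row up to the central row shorter than C — unless a cursed
-- start corner makes A return -1 before reading them). It thereby also excludes matrices with
-- a malformed tail that A never reads because an earlier all-cursed row has emptied the DP
-- (A returns -1 there; B reads every row up to the central row eagerly and raises).
def Pre_dp_indiana_marion (R : Int) (C : Int) (matriz : List (List Int)) (central_row : Int) : Prop :=
  matriz ≠ [] ∧ matriz.headI ≠ [] ∧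
    (matriz.headI.getD 0 0 = -1 ∨
      (-(matriz.headI.length : Int) ≤ C - 1 ∧ C - 1 < (matriz.headI.length : Int) ∧
        PySem.List.pyGetD matriz.headI (C - 1) 0 = -1) ∨
      (1 ≤ C ∧ C ≤ (matriz.headI.length : Int) ∧ central_row < (matriz.length : Int) ∧
        ∀ fila ∈ matriz.take (central_row + 1).toNat, C ≤ (fila.length : Int)))
instance (R : Int) (C : Int) (matriz : List (List Int)) (central_row : Int) : Decidable (Pre_dp_indiana_marion R C matriz central_row) := by unfold Pre_dp_indiana_marion; infer_instance

def pvWitness_dp_indiana_marion : Int × Int × List (List Int) × Int := (2, 2, [[1, 2], [3, 4]], 1)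

def Spec_dp_indiana_marion (R : Int) (C : Int) (matriz : List (List Int)) (central_row : Int) (out : Int) : Prop := out = dp_indiana_marion_alt R C matriz central_row
instance (R : Int) (C : Int) (matriz : List (List Int)) (central_row : Int) (out : Int) : Decidable (Spec_dp_indiana_marion R C matriz central_row out) := by unfold Spec_dp_indiana_marion; infer_instance

-- ===== CLAIM (what is proved, stated in full; the proofs are below) =====
def Claim_equal_dp_indiana_marion : Prop := ∀ (R : Int) (C : Int) (matriz : List (List Int)) (central_row : Int), Dom_dp_indiana_marion R C matriz central_row → Pre_dp_indiana_marion R C matriz central_row → Spec_dp_indiana_marion R C matriz central_row (dp_indiana_marion R C matriz central_row)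

-- ===== LEMMAS AND PROOFS =====

-- grid entry read the way both ports read it, at Nat indices
def pvEnt (g : List (List Int)) (i j : Nat) : Int := (g.getD i []).getD j (-1)

-- a C×C grid
def pvOK (n : Nat) (g : List (List Int)) : Prop := g.length = n ∧ ∀ r ∈ g, r.length = n

theorem pvFoldl_ite_nil {α β : Type} (c : Prop) [inst : Decidable c] (L : List α)
    (f : β → α → β) (acc : β) :
    (if c then ([] : List α) else L).foldl f acc = if c then acc else L.foldl f acc := by
  split <;> rfl

theorem pvEnt_eq_getElem {g : List (List Int)} {i j : Nat} (hi : i < g.length)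
    (hj : j < g[i].length) : pvEnt g i j = g[i][j] := by
  unfold pvEnt
  rw [List.getD_eq_getElem _ _ hi, List.getD_eq_getElem _ _ hj]

theorem pvGridExt {n : Nat} {g1 g2 : List (List Int)} (h1 : pvOK n g1) (h2 : pvOK n g2)
    (h : ∀ i j, i < n → j < n → pvEnt g1 i j = pvEnt g2 i j) : g1 = g2 := by
  apply List.ext_getElem (by rw [h1.1, h2.1])
  intro i hi1 hi2
  apply List.ext_getElem
    (by rw [h1.2 _ (List.getElem_mem hi1), h2.2 _ (List.getElem_mem hi2)])
  intro j hj1 hj2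
  have e1 := pvEnt_eq_getElem hi1 hj1
  have e2 := pvEnt_eq_getElem hi2 hj2
  rw [← e1, ← e2]
  exact h i j (by rw [← h1.1]; exact hi1)
    (by rw [← h1.2 _ (List.getElem_mem hi1)]; exact hj1)

-- the update events generated by A's four nested loops, in generation order
def pvEvents (C : Int) (fila : List Int) (g : List (List Int)) : List (Int × Int × Int) :=
  (PySem.List.pyRange 0 C).flatMap (fun ci_prev =>
    (PySem.List.pyRange 0 C).flatMap (fun cm_prev =>
      let v := PySem.List.pyGetD (PySem.List.pyGetD g ci_prev []) cm_prev (-1)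
      if v = -1 then []
      else
        ([-1, 0, 1] : List Int).flatMap (fun di =>
          let ci_new := ci_prev + di
          if ¬(0 ≤ ci_new ∧ ci_new < C) ∨ PySem.List.pyGetD fila ci_new 0 = -1 then []
          else
            ([-1, 0, 1] : List Int).flatMap (fun dm =>
              let cm_new := cm_prev + dm
              if ¬(0 ≤ cm_new ∧ cm_new < C) ∨ PySem.List.pyGetD fila cm_new 0 = -1 then []
              else
                [(ci_new, cm_new,
                  if ci_new = cm_new then v + PySem.List.pyGetD fila ci_new 0
                  else v + PySem.List.pyGetD fila ci_new 0 + PySem.List.pyGetD fila cm_new 0)]))))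

theorem pvStepA_eq_foldl_events (C : Int) (fila : List Int) (g : List (List Int)) :
    pvStepA C fila g
      = (pvEvents C fila g).foldl (fun d e => pvUpdA d e.1 e.2.1 e.2.2) (pvGridA C) := by
  unfold pvStepA pvEvents
  simp only [List.foldl_flatMap, pvFoldl_ite_nil, List.foldl_cons, List.foldl_nil]

theorem pvEvents_inrange (C : Int) (fila : List Int) (g : List (List Int)) :
    ∀ e ∈ pvEvents C fila g, 0 ≤ e.1 ∧ e.1 < C ∧ 0 ≤ e.2.1 ∧ e.2.1 < C := by
  intro e he
  simp only [pvEvents, List.mem_flatMap, List.mem_ite_nil_left, PySem.List.mem_pyRange_one,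
    List.mem_cons, List.not_mem_nil, or_false] at he
  obtain ⟨ci, hci, cm, hcm, hv, di, hdi, hgi, dm, hdm, hgj, rfl⟩ := he
  push Not at hgi hgj
  dsimp only
  exact ⟨hgi.1.1, hgi.1.2, hgj.1.1, hgj.1.2⟩

theorem pvUpdA_ok {n : Nat} {d : List (List Int)} (hd : pvOK n d) {a : Int} (ha : 0 ≤ a)
    (b v : Int) : pvOK n (pvUpdA d a b v) := by
  unfold pvUpdA
  split
  · rw [PySem.List.pySetD_of_nonneg _ _ ha]
    by_cases han : a.toNat < d.length
    · refine ⟨by rw [List.length_set]; exact hd.1, ?_⟩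
      intro r hr
      rcases List.mem_or_eq_of_mem_set hr with h | h
      · exact hd.2 _ h
      · subst h
        rw [PySem.List.length_pySetD, PySem.List.pyGetD_of_nonneg _ _ ha,
          List.getD_eq_getElem _ _ han]
        exact hd.2 _ (List.getElem_mem han)
    · rw [List.set_eq_of_length_le (by omega)]
      exact hd
  · exact hd

theorem pvUpdA_ent {n : Nat} {d : List (List Int)} (hd : pvOK n d) {a b : Int} (v : Int)
    (ha : 0 ≤ a ∧ a < (n : Int)) (hb : 0 ≤ b ∧ b < (n : Int)) {i j : Nat}
    (hi : i < n) (hj : j < n) :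
    pvEnt (pvUpdA d a b v) i j
      = if a = (i : Int) ∧ b = (j : Int) then max (pvEnt d i j) v else pvEnt d i j := by
  have hd1 := hd.1
  have han : a.toNat < d.length := by omega
  have hrow : PySem.List.pyGetD d a [] = d[a.toNat] := by
    rw [PySem.List.pyGetD_of_nonneg _ _ ha.1, List.getD_eq_getElem _ _ han]
  have hrl : d[a.toNat].length = n := hd.2 _ (List.getElem_mem han)
  have hbn : b.toNat < d[a.toNat].length := by omega
  have hcur : PySem.List.pyGetD (PySem.List.pyGetD d a []) b (-1) = d[a.toNat][b.toNat] := by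
    rw [hrow, PySem.List.pyGetD_of_nonneg _ _ hb.1, List.getD_eq_getElem _ _ hbn]
  have hin : i < d.length := by omega
  have hjn : j < d[i].length := by rw [hd.2 _ (List.getElem_mem hin)]; omega
  have hEd : pvEnt d i j = d[i][j] := pvEnt_eq_getElem hin hjn
  unfold pvUpdA
  rw [hcur, hrow, PySem.List.pySetD_of_nonneg _ _ hb.1, PySem.List.pySetD_of_nonneg _ _ ha.1]
  have hsetlen : (d.set a.toNat (d[a.toNat].set b.toNat v)).length = d.length :=
    List.length_set
  by_cases hij : a = (i : Int) ∧ b = (j : Int)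
  · obtain ⟨hai, hbj⟩ := hij
    have hia : a.toNat = i := by omega
    have hjb : b.toNat = j := by omega
    rw [if_pos (show a = (i : Int) ∧ b = (j : Int) from ⟨hai, hbj⟩)]
    split
    · rename_i hgt
      have h1 : i < (d.set a.toNat (d[a.toNat].set b.toNat v)).length := by
        rw [hsetlen]; exact hin
      have hrowset : (d.set a.toNat (d[a.toNat].set b.toNat v))[i] =
          d[a.toNat].set b.toNat v := by
        rw [List.getElem_set]
        simp [hia]
      have h2 : j < (d.set a.toNat (d[a.toNat].set b.toNat v))[i].length := by
        rw [hrowset, List.length_set]; omega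
      rw [pvEnt_eq_getElem h1 h2]
      have : (d.set a.toNat (d[a.toNat].set b.toNat v))[i][j] = v := by
        simp only [hrowset]
        rw [List.getElem_set]
        simp [hjb]
      rw [this, hEd]
      have : d[i][j] = d[a.toNat][b.toNat] := by simp [hia, hjb]
      rw [this]
      exact (max_eq_right (le_of_lt hgt)).symm
    · rename_i hle
      rw [hEd]
      have : d[i][j] = d[a.toNat][b.toNat] := by simp [hia, hjb]
      rw [this]
      omega
  · rw [if_neg hij]
    split
    · have h1 : i < (d.set a.toNat (d[a.toNat].set b.toNat v)).length := by
        rw [hsetlen]; exact hin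
      by_cases hia : a.toNat = i
      · have hjb : b.toNat ≠ j := by
          intro hc; exact hij ⟨by omega, by omega⟩
        have hrowset : (d.set a.toNat (d[a.toNat].set b.toNat v))[i] =
            d[a.toNat].set b.toNat v := by
          rw [List.getElem_set]; simp [hia]
        have h2 : j < (d.set a.toNat (d[a.toNat].set b.toNat v))[i].length := by
          rw [hrowset, List.length_set]; omega
        rw [pvEnt_eq_getElem h1 h2, hEd]
        simp only [hrowset]
        rw [List.getElem_set, if_neg hjb]
        simp [hia]
      · have hrowset : (d.set a.toNat (d[a.toNat].set b.toNat v))[i] = d[i] := by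
          rw [List.getElem_set, if_neg hia]
        have h2 : j < (d.set a.toNat (d[a.toNat].set b.toNat v))[i].length := by
          rw [hrowset]; exact hjn
        rw [pvEnt_eq_getElem h1 h2, hEd]
        simp only [hrowset]
    · rfl

theorem pvFoldlUpd_ok {n : Nat} (L : List (Int × Int × Int)) {d : List (List Int)}
    (hd : pvOK n d) (hL : ∀ e ∈ L, 0 ≤ e.1) :
    pvOK n (L.foldl (fun d e => pvUpdA d e.1 e.2.1 e.2.2) d) := by
  induction L generalizing d with
  | nil => exact hd
  | cons e L ih =>
      exact ih (pvUpdA_ok hd (hL e (List.mem_cons_self ..)) _ _)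
        (fun e' h' => hL e' (List.mem_cons_of_mem _ h'))

theorem pvFoldlUpd_ent {n : Nat} (L : List (Int × Int × Int)) {d : List (List Int)}
    (hd : pvOK n d)
    (hL : ∀ e ∈ L, 0 ≤ e.1 ∧ e.1 < (n : Int) ∧ 0 ≤ e.2.1 ∧ e.2.1 < (n : Int))
    {i j : Nat} (hi : i < n) (hj : j < n) :
    pvEnt (L.foldl (fun d e => pvUpdA d e.1 e.2.1 e.2.2) d) i j
      = ((L.filter (fun e => decide (e.1 = (i : Int) ∧ e.2.1 = (j : Int)))).map
          (fun e => e.2.2)).foldl max (pvEnt d i j) := by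
  induction L generalizing d with
  | nil => rfl
  | cons e L ih =>
      obtain ⟨h1, h2, h3, h4⟩ := hL e (List.mem_cons_self ..)
      have hok : pvOK n (pvUpdA d e.1 e.2.1 e.2.2) := pvUpdA_ok hd h1 _ _
      have hrest : ∀ e' ∈ L, 0 ≤ e'.1 ∧ e'.1 < (n : Int) ∧ 0 ≤ e'.2.1 ∧ e'.2.1 < (n : Int) :=
        fun e' h' => hL e' (List.mem_cons_of_mem _ h')
      simp only [List.foldl_cons, List.filter_cons]
      rw [ih hok hrest]
      rw [pvUpdA_ent hd _ ⟨h1, h2⟩ ⟨h3, h4⟩ hi hj]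
      by_cases hc : e.1 = (i : Int) ∧ e.2.1 = (j : Int)
      · simp [hc]
      · simp [hc]

theorem pvEnt_gridA (C : Int) {i j : Nat} (hi : i < C.toNat) (hj : j < C.toNat) :
    pvEnt (pvGridA C) i j = -1 := by
  have hC : C = ((C.toNat : Nat) : Int) := by omega
  unfold pvEnt pvGridA
  rw [hC]
  simp only [List.getD_eq_getElem?_getD]
  rw [PySem.List.getElem?_map_pyRange_zero _ _ _ hi]
  simp only [Option.getD_some]
  rw [PySem.List.getElem?_map_pyRange_zero _ _ _ hj]
  rfl

theorem pvOK_gridA (C : Int) : pvOK C.toNat (pvGridA C) := by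
  refine ⟨by simp [pvGridA, PySem.List.length_pyRange_one], ?_⟩
  intro r hr
  rcases List.mem_map.1 hr with ⟨ci, _, rfl⟩
  simp [PySem.List.length_pyRange_one]

theorem pvOK_stepB (C : Int) (fila : List Int) (g : List (List Int)) :
    pvOK C.toNat (pvStepB C fila g) := by
  refine ⟨by simp [pvStepB, PySem.List.length_pyRange_one], ?_⟩
  intro r hr
  rcases List.mem_map.1 hr with ⟨ci, _, rfl⟩
  simp [PySem.List.length_pyRange_one]

theorem pvEnt_stepB (C : Int) (fila : List Int) (g : List (List Int)) {i j : Nat}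
    (hi : i < C.toNat) (hj : j < C.toNat) :
    pvEnt (pvStepB C fila g) i j = pvCelda C fila g (i : Int) (j : Int) := by
  have hC : C = ((C.toNat : Nat) : Int) := by omega
  unfold pvEnt pvStepB
  rw [hC]
  simp only [List.getD_eq_getElem?_getD]
  rw [PySem.List.getElem?_map_pyRange_zero _ _ _ hi]
  simp only [Option.getD_some]
  rw [PySem.List.getElem?_map_pyRange_zero _ _ _ hj]
  rw [← hC]
  rfl

theorem pvFoldlMax_congr {L1 L2 : List Int} (a : Int) (h : ∀ v, v ∈ L1 ↔ v ∈ L2) :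
    L1.foldl max a = L2.foldl max a := by
  have le : ∀ {M1 M2 : List Int}, (∀ v ∈ M1, v ∈ M2) → M1.foldl max a ≤ M2.foldl max a := by
    intro M1 M2 hm
    rcases PySem.List.foldl_max_mem M1 a with h1 | h1
    · rw [h1]; exact (PySem.List.le_foldl_max M2 a).1
    · exact (PySem.List.le_foldl_max M2 a).2 _ (hm _ h1)
  exact le_antisymm (le fun v hv => (h v).1 hv) (le fun v hv => (h v).2 hv)

theorem pvMemEvents (C : Int) (fila : List Int) (g : List (List Int)) {i j : Nat}
    (hi : i < C.toNat) (hj : j < C.toNat) (v : Int) :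
    (v ∈ ((pvEvents C fila g).filter
        (fun e => decide (e.1 = (i : Int) ∧ e.2.1 = (j : Int)))).map (fun e => e.2.2))
      ↔ (PySem.List.pyGetD fila (i : Int) 0 ≠ -1 ∧ PySem.List.pyGetD fila (j : Int) 0 ≠ -1 ∧
          v ∈ ((([(i : Int) - 1, (i : Int), (i : Int) + 1] : List Int).filter
                (fun pi => decide (0 ≤ pi ∧ pi < C))).flatMap
            (fun pi =>
              (([(j : Int) - 1, (j : Int), (j : Int) + 1] : List Int).filter
                  (fun pm => decide (0 ≤ pm ∧ pm < C))).filterMap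
                (fun pm =>
                  if PySem.List.pyGetD (PySem.List.pyGetD g pi []) pm (-1) ≠ -1 then
                    some (PySem.List.pyGetD (PySem.List.pyGetD g pi []) pm (-1) +
                      (if (i : Int) = (j : Int) then PySem.List.pyGetD fila (i : Int) 0
                       else PySem.List.pyGetD fila (i : Int) 0 + PySem.List.pyGetD fila (j : Int) 0))
                  else none)))) := by
  have hiC : ((i : Int)) < C := by omega
  have hjC : ((j : Int)) < C := by omega
  simp only [pvEvents, List.mem_map, List.mem_filter, List.mem_flatMap,
    List.mem_ite_nil_left, PySem.List.mem_pyRange_one, List.mem_cons, List.not_mem_nil,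
    or_false, decide_eq_true_eq, List.mem_filterMap, Option.ite_none_right_eq_some,
    Option.some.injEq]
  constructor
  · rintro ⟨e, ⟨⟨ci, hci, cm, hcm, hv0, di, hdi, hgi, dm, hdm, hgj, rfl⟩, ht1, ht2⟩, rfl⟩
    dsimp only at ht1 ht2 ⊢
    push Not at hgi hgj
    obtain ⟨⟨hgi1, hgi2⟩, hgi3⟩ := hgi
    obtain ⟨⟨hgj1, hgj2⟩, hgj3⟩ := hgj
    rw [ht1] at hgi3
    rw [ht2] at hgj3
    refine ⟨hgi3, hgj3, ci, ⟨?_, hci⟩, cm, ⟨?_, hcm⟩, hv0, ?_⟩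
    · omega
    · omega
    · rw [ht1, ht2]
      split_ifs <;> omega
  · rintro ⟨hfi, hfj, pi, hpi, pm, hpm, hsome⟩
    obtain ⟨hne, hval⟩ := hsome
    have hii : pi + ((i : Int) - pi) = (i : Int) := by ring
    have hjj : pm + ((j : Int) - pm) = (j : Int) := by ring
    refine ⟨((i : Int), (j : Int), v),
      ⟨⟨pi, ⟨hpi.2.1, hpi.2.2⟩, pm, ⟨hpm.2.1, hpm.2.2⟩, hne,
        (i : Int) - pi, ?_, ?_, (j : Int) - pm, ?_, ?_, ?_⟩, rfl, rfl⟩, rfl⟩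
    · omega
    · rw [hii]
      push Not
      exact ⟨⟨by omega, hiC⟩, hfi⟩
    · omega
    · rw [hjj]
      push Not
      exact ⟨⟨by omega, hjC⟩, hfj⟩
    · rw [hii, hjj, ← hval]
      split_ifs <;> ring_nf

theorem pvStepA_eq_stepB (C : Int) (fila : List Int) (g : List (List Int)) :
    pvStepA C fila g = pvStepB C fila g := by
  have hev := pvEvents_inrange C fila g
  have hevN : ∀ e ∈ pvEvents C fila g,
      0 ≤ e.1 ∧ e.1 < ((C.toNat : Nat) : Int) ∧ 0 ≤ e.2.1 ∧ e.2.1 < ((C.toNat : Nat) : Int) := by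
    intro e he
    have h := hev e he
    refine ⟨h.1, by omega, h.2.2.1, by omega⟩
  have hA : pvOK C.toNat (pvStepA C fila g) := by
    rw [pvStepA_eq_foldl_events]
    exact pvFoldlUpd_ok _ (pvOK_gridA C) (fun e he => (hev e he).1)
  apply pvGridExt hA (pvOK_stepB C fila g)
  intro i j hi hj
  rw [pvEnt_stepB C fila g hi hj, pvStepA_eq_foldl_events,
    pvFoldlUpd_ent _ (pvOK_gridA C) hevN hi hj, pvEnt_gridA C hi hj]
  unfold pvCelda
  by_cases hblock : PySem.List.pyGetD fila (i : Int) 0 = -1 ∨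
      PySem.List.pyGetD fila (j : Int) 0 = -1
  · rw [if_pos hblock]
    have hnil : (((pvEvents C fila g).filter
        (fun e => decide (e.1 = (i : Int) ∧ e.2.1 = (j : Int)))).map (fun e => e.2.2))
        = ([] : List Int) := by
      refine List.eq_nil_iff_forall_not_mem.2 (fun v hv => ?_)
      rcases (pvMemEvents C fila g hi hj v).1 hv with ⟨h1, h2, _⟩
      tauto
    rw [hnil]
    rfl
  · rw [if_neg hblock]
    push Not at hblock
    dsimp only
    apply pvFoldlMax_congr
    intro v
    rw [pvMemEvents C fila g hi hj v]
    constructor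
    · rintro ⟨_, _, h⟩
      exact h
    · intro h
      exact ⟨hblock.1, hblock.2, h⟩

theorem pvLoop_eq (C : Int) (matriz : List (List Int)) (L : List Int)
    (g : List (List Int)) :
    L.foldl (fun dp s => pvStepA C (PySem.List.pyGetD matriz s []) dp) g
      = L.foldl (fun dp s => pvStepB C (PySem.List.pyGetD matriz s []) dp) g := by
  induction L generalizing g with
  | nil => rfl
  | cons s L ih =>
      rw [List.foldl_cons, List.foldl_cons, pvStepA_eq_stepB]
      exact ih _

theorem pvFoldlStepB_ok (C : Int) (matriz : List (List Int)) (L : List Int)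
    {g : List (List Int)} (hg : pvOK C.toNat g) :
    pvOK C.toNat (L.foldl (fun dp s => pvStepB C (PySem.List.pyGetD matriz s []) dp) g) := by
  induction L generalizing g with
  | nil => exact hg
  | cons s L ih => exact ih (pvOK_stepB C _ _)

theorem pvInit_eq (C : Int) (hC : 1 ≤ C) (inicio : Int) :
    PySem.List.pySetD (pvGridA C) 0
        (PySem.List.pySetD (PySem.List.pyGetD (pvGridA C) 0 []) (C - 1) inicio)
      = (PySem.List.pyRange 0 C).map (fun ci =>
          (PySem.List.pyRange 0 C).map (fun cm => if ci = 0 ∧ cm = C - 1 then inicio else -1)) := by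
  have hC0 : (0 : Nat) < C.toNat := by omega
  have hrow0 : PySem.List.pyGetD (pvGridA C) 0 [] = (PySem.List.pyRange 0 C).map (fun _ => (-1 : Int)) := by
    rw [PySem.List.pyGetD_of_nonneg _ _ (le_refl 0)]
    have : (0 : Int).toNat = 0 := rfl
    rw [this]
    unfold pvGridA
    rw [List.getD_eq_getElem _ _ (by simp [PySem.List.length_pyRange_one]; omega)]
    simp
  have hOKL : pvOK C.toNat (PySem.List.pySetD (pvGridA C) 0
      (PySem.List.pySetD (PySem.List.pyGetD (pvGridA C) 0 []) (C - 1) inicio)) := by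
    refine ⟨by rw [PySem.List.length_pySetD]; exact (pvOK_gridA C).1, ?_⟩
    intro r hr
    rw [PySem.List.pySetD_of_nonneg _ _ (le_refl 0)] at hr
    rcases List.mem_or_eq_of_mem_set hr with h | h
    · exact (pvOK_gridA C).2 _ h
    · subst h
      rw [PySem.List.length_pySetD, hrow0]
      simp [PySem.List.length_pyRange_one]
  have hOKR : pvOK C.toNat ((PySem.List.pyRange 0 C).map (fun ci =>
      (PySem.List.pyRange 0 C).map (fun cm => if ci = 0 ∧ cm = C - 1 then inicio else -1))) := by
    refine ⟨by simp [PySem.List.length_pyRange_one], ?_⟩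
    intro r hr
    rcases List.mem_map.1 hr with ⟨ci, _, rfl⟩
    simp [PySem.List.length_pyRange_one]
  apply pvGridExt hOKL hOKR
  intro i j hi hj
  have hCC : C = ((C.toNat : Nat) : Int) := by omega
  have hRHS : pvEnt ((PySem.List.pyRange 0 C).map (fun ci =>
      (PySem.List.pyRange 0 C).map (fun cm => if ci = 0 ∧ cm = C - 1 then inicio else -1))) i j
      = if (i : Int) = 0 ∧ (j : Int) = C - 1 then inicio else -1 := by
    unfold pvEnt
    rw [hCC]
    simp only [List.getD_eq_getElem?_getD]
    rw [PySem.List.getElem?_map_pyRange_zero _ _ _ hi]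
    simp only [Option.getD_some]
    rw [PySem.List.getElem?_map_pyRange_zero _ _ _ hj]
    rw [← hCC]
    rfl
  rw [hRHS]
  unfold pvEnt
  rw [PySem.List.pySetD_of_nonneg _ _ (le_refl 0), hrow0,
    PySem.List.pySetD_of_nonneg _ _ (by omega : (0 : Int) ≤ C - 1)]
  have hget : ∀ (G : List (List Int)) (r : List Int) (k : Nat), k < G.length →
      (G.set (0 : Int).toNat r).getD k [] = if k = 0 then r else G.getD k [] := by
    intro G r k hk
    rw [Int.toNat_zero, List.getD_eq_getElem _ _ (by rw [List.length_set]; exact hk),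
      List.getElem_set]
    by_cases h0 : k = 0
    · rw [if_pos (by omega), if_pos h0]
    · rw [if_neg (by omega), if_neg h0, List.getD_eq_getElem _ _ hk]
  rw [hget _ _ _ (by rw [(pvOK_gridA C).1]; exact hi)]
  by_cases hi0 : i = 0
  · rw [if_pos hi0, hi0]
    have hlen : (((PySem.List.pyRange 0 C).map (fun _ => (-1 : Int))).set
        (C - 1).toNat inicio).length = C.toNat := by
      rw [List.length_set]
      simp [PySem.List.length_pyRange_one]
    rw [List.getD_eq_getElem _ _ (by rw [hlen]; exact hj), List.getElem_set]
    simp only [List.getElem_map]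
    split_ifs <;> omega
  · rw [if_neg hi0, if_neg (by omega : ¬((i : Int) = 0 ∧ (j : Int) = C - 1))]
    have h := pvEnt_gridA C hi hj
    unfold pvEnt at h
    exact h

theorem pvFinal_eq (C : Int) (hC : 0 ≤ C) {g : List (List Int)} (hg : pvOK C.toNat g) :
    pvFinalA C g = g.flatten.foldl max (-1) := by
  unfold pvFinalA
  have h1 : C = PySem.List.len g := by
    rw [PySem.List.len_eq, hg.1]; omega
  rw [h1]
  have houter := PySem.List.foldl_pyRange_pyGetD g []
    (fun mx row => (PySem.List.pyRange 0 (PySem.List.len g)).foldl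
      (fun mx cm => if PySem.List.pyGetD row cm (-1) > mx then PySem.List.pyGetD row cm (-1)
        else mx) mx) (-1) (le_refl 0)
  rw [houter, List.foldl_flatten]
  apply PySem.List.foldl_congr_mem
  intro mx row hrow
  have h2 : PySem.List.len g = PySem.List.len row := by
    rw [PySem.List.len_eq, PySem.List.len_eq, hg.1, hg.2 _ hrow]
  rw [h2]
  have hinner := PySem.List.foldl_pyRange_pyGetD row (-1)
    (fun mx v => if v > mx then v else mx) mx (le_refl 0)
  rw [hinner]
  apply PySem.List.foldl_congr_mem
  intro acc x hx
  rw [max_def]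
  split_ifs <;> omega

-- ===== VERDICT (by name: the statement is the Claim_ definition above) =====
theorem dp_indiana_marion_spec : Claim_equal_dp_indiana_marion := by
  intro R C matriz central_row hDom hPre
  obtain ⟨hne, hne0, hdisj⟩ := hPre
  unfold Spec_dp_indiana_marion dp_indiana_marion dp_indiana_marion_alt
  by_cases hblock : PySem.List.pyGetD (PySem.List.pyGetD matriz 0 []) 0 0 = -1 ∨
      PySem.List.pyGetD (PySem.List.pyGetD matriz 0 []) (C - 1) 0 = -1
  · rw [if_neg (by tauto), if_pos hblock]
  · rw [if_pos (by tauto), if_neg hblock]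
    have hm0 : PySem.List.pyGetD matriz 0 [] = matriz.headI := by
      cases matriz with
      | nil => exact absurd rfl hne
      | cons a l => simp [PySem.List.pyGetD_zero_cons]
    have hC : 1 ≤ C := by
      rcases hdisj with h | h | h
      · exact absurd (by rw [hm0, PySem.List.pyGetD_zero]; exact h)
          (by tauto : PySem.List.pyGetD (PySem.List.pyGetD matriz 0 []) 0 0 ≠ -1)
      · exact absurd (by rw [hm0]; exact h.2.2)
          (by tauto : PySem.List.pyGetD (PySem.List.pyGetD matriz 0 []) (C - 1) 0 ≠ -1)
      · exact h.1
    rw [pvInit_eq C hC (PySem.List.pyGetD (PySem.List.pyGetD matriz 0 []) 0 0 +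
      PySem.List.pyGetD (PySem.List.pyGetD matriz 0 []) (C - 1) 0)]
    have hOK0 : pvOK C.toNat ((PySem.List.pyRange 0 C).map (fun ci =>
        (PySem.List.pyRange 0 C).map (fun cm =>
          if ci = 0 ∧ cm = C - 1 then
            PySem.List.pyGetD (PySem.List.pyGetD matriz 0 []) 0 0 +
              PySem.List.pyGetD (PySem.List.pyGetD matriz 0 []) (C - 1) 0
          else -1))) := by
      refine ⟨by simp [PySem.List.length_pyRange_one], ?_⟩
      intro r hr
      rcases List.mem_map.1 hr with ⟨ci, _, rfl⟩
      simp [PySem.List.length_pyRange_one]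
    rw [pvLoop_eq C matriz (PySem.List.pyRange 1 (central_row + 1)) _]
    rw [pvFinal_eq C (by omega) (pvFoldlStepB_ok C matriz _ hOK0)]
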